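-- pv_equiv track=rewrite | github.com/CS2613-FA23/explorationactivity2-kdonovan4 | JumpIt_1.3.py | top_ten
-- ===== SOURCE A (Python) =====
-- def top_ten(strList, a, bigNum):
--     returnStr = "Score\t|\t\tDate\n"
--     returnStr += "----------------------------------\n"
--     num = 10
--     found = False
--
--     # If there are not 10 scores yet, only use the number that there are
--     if len(strList) < 10:
--         num = len(strList)
--     for i in range(num):
--
--         # Places astericks around the new score for visibility, only on first instance in case of duplicate scores on the same date
--         if strList[i] == a and not found:
--
--             # For new score that is 4 or more characters (including negative sign)
--             if bigNum:
--                 newString = strList[i]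
--                 newString = newString.replace("\n", "")
--                 returnStr += "**" + newString + "**\n"
--                 found = True
--
--             # For new score that is 3 or less characters (including negative sign)
--             else:
--                 newString = strList[i].replace("\t", "", 1)
--                 newString = newString.replace("\n", "")
--                 returnStr += "**" + newString + "**\n"
--                 found = True
--         else:
--             returnStr += strList[i]
--
--     # if the new score is not in top ten, place it below the list with an empty line
--     if not found:
--         returnStr += "\n" + a
--     return returnStr
-- ===== SOURCE B (Python) =====
-- def top_ten(strList, a, bigNum):
--     # Locate-then-build: find the marked position first, then splice the list.
--     header = "Score\t|\t\tDate\n----------------------------------\n"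
--     top = strList[:10]
--     if a in top:
--         idx = top.index(a)
--         core = a if bigNum else a.replace("\t", "", 1)
--         marked = "**" + core.replace("\n", "") + "**\n"
--         return header + "".join(top[:idx]) + marked + "".join(top[idx + 1:])
--     return header + "".join(top) + "\n" + a
-- ===== Notes on version B (the rewrite author's own statement) =====
-- stated objective: simpler
-- what changed: Replaces A's single pass with a mutable found-flag by a locate-then-splice decomposition: slice the top ten, find the first index equal to a, then concatenate prefix + marked line + suffix (or whole list + trailing a when absent).
import Mathlib
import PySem

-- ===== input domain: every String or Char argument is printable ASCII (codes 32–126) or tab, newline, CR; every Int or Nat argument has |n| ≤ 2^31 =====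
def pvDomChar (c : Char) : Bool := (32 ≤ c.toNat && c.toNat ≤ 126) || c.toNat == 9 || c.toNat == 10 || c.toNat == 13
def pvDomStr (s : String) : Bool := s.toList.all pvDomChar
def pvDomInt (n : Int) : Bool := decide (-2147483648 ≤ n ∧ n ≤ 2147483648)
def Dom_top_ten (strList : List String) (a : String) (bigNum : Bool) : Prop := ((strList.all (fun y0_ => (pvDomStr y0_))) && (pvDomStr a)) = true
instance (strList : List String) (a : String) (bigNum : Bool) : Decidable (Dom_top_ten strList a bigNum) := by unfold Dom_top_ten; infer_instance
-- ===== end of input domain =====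

-- B replaces A's single pass with a found-flag by a locate-then-splice decomposition (objective: simpler).
-- Shared exact ports of the Python string builtins both versions call:
-- s.replace("\n", "") with a single-char old and empty new removes every '\n' = filter.
def pvRemNL (s : List Char) : List Char := s.filter (fun c => c ≠ '\n')
-- s.replace("\t", "", 1) removes the FIRST '\t' only (count = 1, single-char old, empty new).
def pvRemFirstTab : List Char → List Char
  | [] => []
  | c :: cs => if c = '\t' then cs else c :: pvRemFirstTab cs

def pvHeader : List Char := ("Score\t|\t\tDate\n" ++ "----------------------------------\n").toList

-- ===== PORT A =====
-- one step of A's loop body, state = (returnStr, found)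
def pvStepA (a : List Char) (bigNum : Bool) (st : List Char × Bool) (s : List Char) : List Char × Bool :=
  if s = a ∧ st.2 = false then
    if bigNum then
      (st.1 ++ ('*' :: '*' :: (pvRemNL s ++ ['*', '*', '\n'])), true)
    else
      (st.1 ++ ('*' :: '*' :: (pvRemNL (pvRemFirstTab s) ++ ['*', '*', '\n'])), true)
  else (st.1 ++ s, st.2)

def top_ten (strList : List String) (a : String) (bigNum : Bool) : String :=
  let items := strList.map String.toList
  -- num = 10, capped at len(strList); 'for i in range(num): … strList[i] …' = fold over the first num elements
  let num := if strList.length < 10 then strList.length else 10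
  let st := (items.take num).foldl (pvStepA a.toList bigNum) (pvHeader, false)
  if st.2 then String.mk st.1 else String.mk (st.1 ++ '\n' :: a.toList)

-- ===== PORT B =====
-- B's marked line "**" + core.replace("\n","") + "**\n"
def pvMark (bigNum : Bool) (a : List Char) : List Char :=
  if bigNum then '*' :: '*' :: (pvRemNL a ++ ['*', '*', '\n'])
  else '*' :: '*' :: (pvRemNL (pvRemFirstTab a) ++ ['*', '*', '\n'])

def top_ten_alt (strList : List String) (a : String) (bigNum : Bool) : String :=
  let top := (strList.map String.toList).take 10   -- strList[:10], nonnegative literal bound = take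
  -- 'if a in top: idx = top.index(a)' = match on first-occurrence index
  match PySem.List.index? top a.toList with
  | some idx =>
      -- top[:idx] / top[idx+1:] with idx : Nat = take / drop; "".join = flatten
      String.mk (pvHeader ++ (top.take idx).flatten ++ pvMark bigNum a.toList ++ (top.drop (idx + 1)).flatten)
  | none => String.mk (pvHeader ++ top.flatten ++ '\n' :: a.toList)

-- ===== PRECONDITION & SPEC =====
def Spec_top_ten (strList : List String) (a : String) (bigNum : Bool) (out : String) : Prop := out = top_ten_alt strList a bigNum
instance (strList : List String) (a : String) (bigNum : Bool) (out : String) : Decidable (Spec_top_ten strList a bigNum out) := by unfold Spec_top_ten; infer_instance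

-- ===== CLAIM (what is proved, stated in full; the proofs are below) =====
def Claim_equal_top_ten : Prop := ∀ (strList : List String) (a : String) (bigNum : Bool), Dom_top_ten strList a bigNum → Spec_top_ten strList a bigNum (top_ten strList a bigNum)

-- ===== LEMMAS AND PROOFS =====

-- once found, A's loop just appends every remaining element
theorem pvStepA_found (a : List Char) (bigNum : Bool) :
    ∀ (l : List (List Char)) (acc : List Char),
      l.foldl (pvStepA a bigNum) (acc, true) = (acc ++ l.flatten, true) := by
  intro l
  induction l with
  | nil => intro acc; simp
  | cons s t ih =>
      intro acc
      simp only [List.foldl_cons, pvStepA]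
      simp [ih, List.append_assoc]

-- A's loop from found = false, characterised by the first-occurrence index
theorem pvLoopA_main (a : List Char) (bigNum : Bool) :
    ∀ (l : List (List Char)) (acc : List Char),
      l.foldl (pvStepA a bigNum) (acc, false) =
        match PySem.List.index? l a with
        | some k => (acc ++ (l.take k).flatten ++ pvMark bigNum a ++ (l.drop (k + 1)).flatten, true)
        | none => (acc ++ l.flatten, false) := by
  intro l
  induction l with
  | nil => intro acc; simp [PySem.List.index?]
  | cons s t ih =>
      intro acc
      by_cases hs : s = a
      · subst hs
        simp only [List.foldl_cons, pvStepA, PySem.List.index?_cons_self]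
        rcases bigNum with _ | _ <;>
          simp [pvStepA_found, pvMark, List.append_assoc]
      · have hne : PySem.List.index? (s :: t) a = (PySem.List.index? t a).map (· + 1) :=
          PySem.List.index?_cons_of_ne t hs
        simp only [List.foldl_cons, pvStepA, hs]
        rw [if_neg (by simp)]
        rw [ih]
        rw [hne]
        cases h : PySem.List.index? t a with
        | none => simp [List.append_assoc]
        | some k => simp [List.append_assoc]

theorem top_ten_spec : Claim_equal_top_ten := by
  intro strList a bigNum _
  unfold Spec_top_ten top_ten top_ten_alt
  have htake :
      (strList.map String.toList).take (if strList.length < 10 then strList.length else 10) =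
        (strList.map String.toList).take 10 := by
    by_cases h : strList.length < 10
    · simp only [if_pos h]
      rw [List.take_of_length_le (by simp), List.take_of_length_le (by simp; omega)]
    · simp [h]
  simp only [htake]
  rw [pvLoopA_main]
  cases h : PySem.List.index? ((strList.map String.toList).take 10) a.toList with
  | none => simp
  | some k => simp [List.append_assoc]
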